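-- pv_equiv track=rewrite | github.com/yooncoderhere/2025_yooncoder | 백준/Gold/18869. 멀티버스 Ⅱ/멀티버스 Ⅱ.py | solution
-- ===== SOURCE A (Python) =====
-- from collections import defaultdict
--
-- def solution(k,n, universes):
--
--     patterns_dict = defaultdict(int) # 패턴 개수 저장
--     result = 0
--
--     for universe in universes:
--         sorted_uni = sorted(set(universe)) # 중복 제거 후 정렬
--         #중복을 제거 해도 되나..
--         indxe_map = {value : idx for idx, value in enumerate(sorted_uni)}
--         pattern = tuple(indxe_map[x] for x in universe)
--
--         result += patterns_dict[pattern]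
--         patterns_dict[pattern] +=1
--
--     return result # 균등한 우주의 쌍의 개수 출력
-- ===== SOURCE B (Python) =====
-- from collections import Counter
--
-- def solution(k, n, universes):
--     # pattern: for each x, the number of distinct values in the universe smaller than x
--     # (== x's index in sorted(set(universe))); then count pairs per pattern group as c*(c-1)//2
--     cnt = Counter(
--         tuple(len({y for y in u if y < x}) for x in u)
--         for u in universes
--     )
--     return sum(c * (c - 1) // 2 for c in cnt.values())
-- ===== Notes on version B (the rewrite author's own statement) =====
-- stated objective: alternative
-- what changed: B compresses each universe by directly counting the distinct smaller values for each element (no sort, no set, no value-to-index dict) and counts equal-pattern pairs by building a Counter of all patterns and summing c*(c-1)//2, instead of A's sorted-set index map and running one-pass pair accumulation.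
import Mathlib
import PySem

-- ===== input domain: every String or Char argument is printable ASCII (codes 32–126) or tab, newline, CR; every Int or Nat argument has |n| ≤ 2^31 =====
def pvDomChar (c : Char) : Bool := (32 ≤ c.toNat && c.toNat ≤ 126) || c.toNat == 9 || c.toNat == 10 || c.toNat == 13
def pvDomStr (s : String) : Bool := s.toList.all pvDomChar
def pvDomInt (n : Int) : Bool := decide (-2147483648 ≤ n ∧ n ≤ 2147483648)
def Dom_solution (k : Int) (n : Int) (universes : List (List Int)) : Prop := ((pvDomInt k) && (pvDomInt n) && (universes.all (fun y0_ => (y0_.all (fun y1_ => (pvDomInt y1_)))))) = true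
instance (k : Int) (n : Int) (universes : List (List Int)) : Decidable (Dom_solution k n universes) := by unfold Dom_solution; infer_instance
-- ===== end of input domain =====

-- B replaces A's per-universe set+sort+index-map compression by a direct count of smaller
-- distinct values, and A's running pair count by a Counter of patterns summed as c*(c-1)//2
-- (objective: alternative; same asymptotic cost is NOT claimed — per-universe work differs).

-- ===== PORT A =====
-- pattern of one universe, exactly as A computes it
def pat_A (u : List Int) : List Int :=
  let sorted_uni := PySem.List.sorted (PySem.Set.ofList u) (fun v => v) false
  -- dict comprehension {value: idx for idx, value in enumerate(sorted_uni)} = loop of insertions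
  let indxe_map := (PySem.List.enumerate sorted_uni).foldl
      (fun (d : PySem.Dict Int Int) p => d.insert p.2 p.1) PySem.Dict.empty
  -- indxe_map[x]: KeyError impossible, every x of u is a key; (·.getD 0) only totalises
  u.map (fun x => (indxe_map.get? x).getD 0)

def solution (k : Int) (n : Int) (universes : List (List Int)) : Int :=
  -- state = (patterns_dict, result); defaultdict read of a missing key yields 0 and the
  -- following += stores c+1 at the same (appended) position, i.e. one insert of c+1
  (universes.foldl
    (fun (st : PySem.Dict (List Int) Int × Int) uni =>
      let pattern := pat_A uni
      let c := st.1.getD pattern 0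
      (st.1.insert pattern (c + 1), st.2 + c))
    (PySem.Dict.empty, 0)).2

-- ===== PORT B =====
-- pattern of one universe: each x mapped to the number of distinct smaller values
def pat_B (u : List Int) : List Int :=
  u.map (fun x => ((PySem.Set.ofList (u.filter (fun y => decide (y < x)))).length : Int))

def solution_alt (k : Int) (n : Int) (universes : List (List Int)) : Int :=
  (PySem.Dict.counter (universes.map pat_B)).values.foldl
    (fun s c => s + PySem.Int.floordiv (c * (c - 1)) 2) 0

-- ===== PRECONDITION & SPEC =====
def Spec_solution (k : Int) (n : Int) (universes : List (List Int)) (out : Int) : Prop := out = solution_alt k n universes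
instance (k : Int) (n : Int) (universes : List (List Int)) (out : Int) : Decidable (Spec_solution k n universes out) := by unfold Spec_solution; infer_instance

-- ===== CLAIM (what is proved, stated in full; the proofs are below) =====
def Claim_equal_solution : Prop := ∀ (k : Int) (n : Int) (universes : List (List Int)), Dom_solution k n universes → Spec_solution k n universes (solution k n universes)

-- ===== LEMMAS AND PROOFS =====

-- rank in a strictly increasing list = number of smaller elements
lemma rank_eq_filter_length (s : List Int) (hs : s.Pairwise (· < ·)) (j : Nat) (hj : j < s.length) :
    (s.filter (fun y => decide (y < s[j]))).length = j := by
  induction s generalizing j with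
  | nil => simp at hj
  | cons a t ih =>
    rcases List.pairwise_cons.mp hs with ⟨ha, ht⟩
    cases j with
    | zero =>
      simp only [List.getElem_cons_zero]
      rw [List.length_eq_zero_iff, List.filter_eq_nil_iff]
      intro y hy
      rcases List.mem_cons.mp hy with rfl | hyt
      · simp
      · simp only [decide_eq_true_eq]; exact not_lt.mpr (le_of_lt (ha y hyt))
    | succ j' =>
      have hj' : j' < t.length := by simpa using hj
      have hx : (a :: t)[j' + 1] = t[j'] := by simp
      rw [hx]
      have haj : a < t[j'] := ha _ (t.getElem_mem hj')
      rw [List.filter_cons]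
      simp only [haj, decide_true, if_pos]
      simp [ih ht j' hj']

lemma dict_lookup_eq_index (s : List Int) (hnd : s.Nodup) (j : Nat) (hj : j < s.length) :
    ((((PySem.List.enumerate s).foldl
        (fun (d : PySem.Dict Int Int) p => d.insert p.2 p.1) PySem.Dict.empty)).get? s[j]).getD 0
      = (j : Int) := by
  set d := (PySem.List.enumerate s).foldl
      (fun (d : PySem.Dict Int Int) p => d.insert p.2 p.1) PySem.Dict.empty with hd
  have hitems : d.items = (PySem.List.enumerate s).map (fun p => (p.2, p.1)) := by
    rw [hd]
    have := PySem.Dict.items_foldl_insert_fresh (l := PySem.List.enumerate s)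
      (k := fun p => p.2) (v := fun p => p.1) (d := (PySem.Dict.empty : PySem.Dict Int Int))
      (by intro a _; simp [PySem.Dict.contains_empty])
      (by rw [PySem.List.map_snd_enumerate]; exact hnd)
    simpa [PySem.Dict.items] using this
  have hkeys : d.keys.Nodup := by
    rw [hd]
    exact PySem.Dict.nodup_keys_foldl_insert_key (PySem.List.enumerate s)
      (fun p => p.2) (fun _ p => p.1) PySem.Dict.empty (by simp [PySem.Dict.keys_empty])
  have hmem : (s[j], (j : Int)) ∈ d.items := by
    rw [hitems]
    refine List.mem_map.mpr ⟨((j : Int), s[j]), ?_, rfl⟩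
    exact (PySem.List.mem_enumerate_iff _ _ _).mpr ⟨j, hj, by simp⟩
  rw [PySem.Dict.get?_of_mem_items _ hmem hkeys]
  rfl

-- the two compressions agree
lemma pat_eq (u : List Int) : pat_A u = pat_B u := by
  unfold pat_A pat_B
  apply List.map_congr_left
  intro x hxu
  set s := PySem.List.sorted (PySem.Set.ofList u) (fun v => v) false with hs
  have hpw : s.Pairwise (· < ·) := PySem.List.sorted_ofList_pairwise_lt u
  have hnd : s.Nodup := hpw.imp ne_of_lt
  have hxs : x ∈ s := by
    rw [hs, PySem.List.mem_sorted]
    exact (PySem.Set.mem_ofList _ _).mpr hxu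
  obtain ⟨j, hj, hxj⟩ := List.mem_iff_getElem.mp hxs
  subst hxj
  rw [dict_lookup_eq_index s hnd j hj]
  -- B's value: distinct elements of u below s[j]
  have hperm : (s.filter (fun y => decide (y < s[j]))).Perm
      ((PySem.Set.ofList u).filter (fun y => decide (y < s[j]))) :=
    (PySem.List.sorted_perm (PySem.Set.ofList u) (fun v => v) false).filter _
  have hperm2 : (PySem.Set.ofList (u.filter (fun y => decide (y < s[j])))).Perm
      ((PySem.Set.ofList u).filter (fun y => decide (y < s[j]))) := by
    rw [List.perm_ext_iff_of_nodup (PySem.Set.nodup_ofList _)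
      ((PySem.Set.nodup_ofList u).filter _)]
    intro a
    simp [PySem.Set.mem_ofList, List.mem_filter]
  have := rank_eq_filter_length s hpw j hj
  have hlen : (PySem.Set.ofList (u.filter (fun y => decide (y < s[j])))).length = j := by
    rw [hperm2.length_eq, ← hperm.length_eq, this]
  rw [hlen]

-- pair count helper on Int
def c2 (c : Int) : Int := PySem.Int.floordiv (c * (c - 1)) 2

lemma c2_succ (c : Int) : c2 (c + 1) = c2 c + c := by
  unfold c2
  have h1 : (c + 1) * (c + 1 - 1) = c * (c - 1) + c * 2 := by ring
  rw [h1, PySem.Int.floordiv_eq_ediv_of_pos (by norm_num),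
      PySem.Int.floordiv_eq_ediv_of_pos (by norm_num)]
  generalize c * (c - 1) = t
  omega

-- the sum B computes, over a list of patterns
def c2sum (ps : List (List Int)) : Int :=
  ((PySem.Set.ofList ps).map (fun q => c2 ((ps.count q : Int)))).sum

lemma foldl_add_c2 (l : List Int) (a : Int) :
    l.foldl (fun s c => s + PySem.Int.floordiv (c * (c - 1)) 2) a = a + (l.map c2).sum := by
  induction l generalizing a with
  | nil => simp
  | cons x t ih =>
    rw [List.foldl_cons, ih, List.map_cons, List.sum_cons]
    have hx : c2 x = PySem.Int.floordiv (x * (x - 1)) 2 := rfl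
    rw [← hx]; ring

lemma solution_alt_eq_c2sum (k n : Int) (universes : List (List Int)) :
    solution_alt k n universes = c2sum (universes.map pat_B) := by
  unfold solution_alt c2sum
  set ps := universes.map pat_B
  have hv : (PySem.Dict.counter ps).values
      = (PySem.Set.ofList ps).map (fun q => ((ps.count q : Int))) := by
    simp only [PySem.Dict.values, PySem.Dict.items_counter, List.map_map]
    rfl
  rw [hv, foldl_add_c2]
  simp only [List.map_map, zero_add]
  rfl

lemma c2sum_snoc (ps : List (List Int)) (p : List Int) :
    c2sum (ps ++ [p]) = c2sum ps + (ps.count p : Int) := by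
  unfold c2sum
  rw [PySem.Set.ofList_append_singleton]
  by_cases hp : p ∈ PySem.Set.ofList ps
  · rw [PySem.Set.add_of_mem hp]
    obtain ⟨s1, s2, hsplit⟩ := List.append_of_mem hp
    have hnd : (PySem.Set.ofList ps).Nodup := PySem.Set.nodup_ofList ps
    rw [hsplit] at hnd
    have hp1 : p ∉ s1 := by
      intro h; exact (List.disjoint_of_nodup_append hnd) h (List.mem_cons_self)
    have hp2 : p ∉ s2 := by
      have := (List.nodup_append.mp hnd).2.1
      exact (List.nodup_cons.mp this).1
    rw [hsplit]
    simp only [List.map_append, List.map_cons, List.sum_append, List.sum_cons]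
    have hcongr : ∀ q ∈ s1 ++ s2, ((ps ++ [p]).count q : Int) = (ps.count q : Int) := by
      intro q hq
      have hqp : q ≠ p := by
        rcases List.mem_append.mp hq with h | h
        · exact fun he => hp1 (he ▸ h)
        · exact fun he => hp2 (he ▸ h)
      have hpq : ¬ p = q := fun he => hqp he.symm
      rw [List.count_append]
      simp [hpq]
    have h1 : s1.map (fun q => c2 (((ps ++ [p]).count q : Int)))
        = s1.map (fun q => c2 ((ps.count q : Int))) :=
      List.map_congr_left fun q hq => by rw [hcongr q (List.mem_append_left _ hq)]
    have h2 : s2.map (fun q => c2 (((ps ++ [p]).count q : Int)))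
        = s2.map (fun q => c2 ((ps.count q : Int))) :=
      List.map_congr_left fun q hq => by rw [hcongr q (List.mem_append_right _ hq)]
    rw [h1, h2]
    have hmid : c2 (((ps ++ [p]).count p : Int)) = c2 ((ps.count p : Int)) + (ps.count p : Int) := by
      have hc : (ps ++ [p]).count p = ps.count p + 1 := by simp [List.count_append]
      rw [hc]; push_cast; exact c2_succ _
    rw [hmid]; ring
  · rw [PySem.Set.add_of_not_mem hp]
    have hpps : p ∉ ps := fun h => hp ((PySem.Set.mem_ofList _ _).mpr h)
    have hcnt0 : ps.count p = 0 := List.count_eq_zero_of_not_mem hpps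
    simp only [List.map_append, List.map_singleton, List.sum_append, List.sum_singleton]
    have h1 : (PySem.Set.ofList ps).map (fun q => c2 (((ps ++ [p]).count q : Int)))
        = (PySem.Set.ofList ps).map (fun q => c2 ((ps.count q : Int))) := by
      apply List.map_congr_left
      intro q hq
      have hqp : q ≠ p := fun he => hpps (he ▸ (PySem.Set.mem_ofList _ _).mp hq)
      have hpq : ¬ p = q := fun he => hqp he.symm
      rw [List.count_append]
      simp [hpq]
    have h2 : c2 (((ps ++ [p]).count p : Int)) = 0 := by
      have hc : (ps ++ [p]).count p = 1 := by simp [List.count_append, hcnt0]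
      rw [hc]; decide
    rw [h1, h2, hcnt0]
    simp

-- A's fold, first component: the dict is a running counter of the patterns seen so far
lemma fold_fst (ps : List (List Int)) (d : PySem.Dict (List Int) Int) (r : Int) :
    (ps.foldl (fun st p => (st.1.insert p (st.1.getD p 0 + 1), st.2 + st.1.getD p 0)) (d, r)).1
      = ps.foldl (fun d p => d.insert p (d.getD p 0 + 1)) d := by
  induction ps generalizing d r with
  | nil => rfl
  | cons p t ih => exact ih _ _

lemma fold_snd (ps : List (List Int)) :
    (ps.foldl (fun st p => (st.1.insert p (st.1.getD p 0 + 1), st.2 + st.1.getD p 0))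
      ((PySem.Dict.empty : PySem.Dict (List Int) Int), 0)).2 = c2sum ps := by
  induction ps using List.reverseRecOn with
  | nil => rfl
  | append_singleton t p ih =>
    rw [List.foldl_append, List.foldl_cons, List.foldl_nil, c2sum_snoc, ← ih]
    simp only [fold_fst]
    rw [PySem.Dict.getD_foldl_insert_add_one]
    simp [PySem.Dict.getD_empty]

-- ===== VERDICT (by name: the statement is the Claim_ definition above) =====
theorem solution_spec : Claim_equal_solution := by
  intro k n universes _
  unfold Spec_solution
  rw [solution_alt_eq_c2sum]
  unfold solution
  have hmap : ∀ (st : PySem.Dict (List Int) Int × Int),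
      universes.foldl
        (fun (st : PySem.Dict (List Int) Int × Int) uni =>
          let pattern := pat_A uni
          let c := st.1.getD pattern 0
          (st.1.insert pattern (c + 1), st.2 + c)) st
      = (universes.map pat_B).foldl
        (fun st p => (st.1.insert p (st.1.getD p 0 + 1), st.2 + st.1.getD p 0)) st := by
    intro st
    rw [List.foldl_map]
    apply PySem.List.foldl_congr_mem
    intro acc u _
    simp [pat_eq u]
  rw [hmap]
  exact fold_snd (universes.map pat_B)
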